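-- pv_equiv track=rewrite | github.com/marcandrewessner/binaryneuralnet-asic-TTIHP26 | test/testmodules/test_mnist_loader.py | packets_to_expected_sram
-- ===== SOURCE A (Python) =====
-- def packets_to_expected_sram(packets: list) -> list:
--     """
--     Simulate the hardware SRAM packing logic in Python to produce the
--     expected contents of SRAM addresses 0..24 after all 98 packets.
--
--       pixel_1 = |pkt[3:0]   (hw: |data_in[3:0])
--       pixel_2 = |pkt[7:4]   (hw: |data_in[7:4])
--       addr  = packet_index >> 2
--       shift = (packet_index % 4) * 2       → 0, 2, 4, 6
--       bm    = 0b11000000 >> shift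
--       data  = {pixel_1, pixel_2, 6'b0} >> shift
--
--     The SRAM write applies the bitmask:
--       mem[addr] = (mem[addr] & ~bm) | (data & bm)
--     """
--     sram = [0] * 256
--     for i, pkt in enumerate(packets):
--         pixel_1 = 1 if (pkt & 0x0F) != 0 else 0
--         pixel_2 = 1 if (pkt & 0xF0) != 0 else 0
--
--         addr  = i >> 2
--         shift = (i % 4) * 2
--         bm    = (0b11000000 >> shift) & 0xFF
--         data  = (((pixel_1 << 7) | (pixel_2 << 6)) >> shift) & 0xFF
--
--         sram[addr] = (sram[addr] & (~bm & 0xFF)) | (data & bm)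
--
--     return sram
-- ===== SOURCE B (Python) =====
-- def packets_to_expected_sram(packets: list) -> list:
--     out = []
--     for a in range(256):
--         chunk = packets[4 * a:4 * a + 4]
--         byte = 0
--         for j, pkt in enumerate(chunk):
--             byte += (1 if pkt & 0x0F else 0) * (1 << (7 - 2 * j)) \
--                   + (1 if pkt & 0xF0 else 0) * (1 << (6 - 2 * j))
--         out.append(byte)
--     return out
-- ===== Notes on version B (the rewrite author's own statement) =====
-- stated objective: alternative
-- what changed: B iterates over the 256 output addresses, assembling each byte in one pass by summing the disjoint 2-bit pixel fields of its 4-packet chunk, instead of A's per-packet read-modify-write with masks into a mutable 256-entry array.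
import Mathlib
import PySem

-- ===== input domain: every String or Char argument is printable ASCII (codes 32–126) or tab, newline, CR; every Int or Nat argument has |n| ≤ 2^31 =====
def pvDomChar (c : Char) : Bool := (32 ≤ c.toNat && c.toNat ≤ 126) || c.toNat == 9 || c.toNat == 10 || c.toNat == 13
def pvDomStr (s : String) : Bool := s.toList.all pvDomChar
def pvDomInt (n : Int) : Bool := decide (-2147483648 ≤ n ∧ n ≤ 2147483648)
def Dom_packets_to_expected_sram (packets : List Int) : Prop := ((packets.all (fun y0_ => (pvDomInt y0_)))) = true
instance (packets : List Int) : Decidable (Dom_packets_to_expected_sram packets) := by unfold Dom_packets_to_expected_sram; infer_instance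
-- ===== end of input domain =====

-- B assembles each of the 256 output bytes from its 4-packet chunk in one pass (disjoint 2-bit
-- fields summed), instead of A's per-packet masked read-modify-write into a mutable array.

-- ===== PORT A =====
-- one iteration of A's loop body (i is the enumerate index)
def pvStepA (sram : List Int) (i : Nat) (pkt : Int) : List Int :=
  let pixel_1 : Int := if PySem.Int.band pkt 0x0F ≠ 0 then 1 else 0
  let pixel_2 : Int := if PySem.Int.band pkt 0xF0 ≠ 0 then 1 else 0
  let addr : Nat := i >>> 2
  let shift : Nat := (i % 4) * 2
  let bm : Int := PySem.Int.band ((192 : Int) >>> shift) 255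
  let data : Int := PySem.Int.band ((PySem.Int.bor (pixel_1 <<< (7 : Nat)) (pixel_2 <<< (6 : Nat))) >>> shift) 255
  let old : Int := PySem.List.pyGetD sram (addr : Int) 0
  PySem.List.pySetD sram (addr : Int) (PySem.Int.bor (PySem.Int.band old (PySem.Int.band (Int.not bm) 255)) (PySem.Int.band data bm))

def pvGoA : List Int → Nat → List Int → List Int
  | [], _, sram => sram
  | pkt :: rest, i, sram => pvGoA rest (i + 1) (pvStepA sram i pkt)

def packets_to_expected_sram (packets : List Int) : List Int :=
  pvGoA packets 0 (List.replicate 256 0)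

-- ===== PORT B =====
-- inner loop: add the two pixel bits of packet j of the chunk into the byte accumulator
def pvByteGo : List Int → Nat → Int → Int
  | [], _, b => b
  | pkt :: rest, j, b =>
      pvByteGo rest (j + 1)
        (b + (if PySem.Int.band pkt 0x0F ≠ 0 then (1 : Int) else 0) * ((1 : Int) <<< (7 - 2 * j))
           + (if PySem.Int.band pkt 0xF0 ≠ 0 then (1 : Int) else 0) * ((1 : Int) <<< (6 - 2 * j)))

def packets_to_expected_sram_alt (packets : List Int) : List Int :=
  (List.range 256).map (fun a =>
    pvByteGo (PySem.List.slice packets (some ((4 * a : Nat) : Int)) (some (((4 * a : Nat) : Int) + 4))) 0 0)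

-- ===== PRECONDITION & SPEC =====
-- Pre_ excludes lists longer than 1024, on which A raises IndexError (addr = i >> 2 ≥ 256).
def Pre_packets_to_expected_sram (packets : List Int) : Prop := packets.length ≤ 1024
instance (packets : List Int) : Decidable (Pre_packets_to_expected_sram packets) := by
  unfold Pre_packets_to_expected_sram; infer_instance

def pvWitness_packets_to_expected_sram : List Int := [0, 5, 16, 17, 255]

def Spec_packets_to_expected_sram (packets : List Int) (out : List Int) : Prop := out = packets_to_expected_sram_alt packets
instance (packets : List Int) (out : List Int) : Decidable (Spec_packets_to_expected_sram packets out) := by unfold Spec_packets_to_expected_sram; infer_instance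

-- ===== CLAIM (what is proved, stated in full; the proofs are below) =====
def Claim_equal_packets_to_expected_sram : Prop := ∀ (packets : List Int), Dom_packets_to_expected_sram packets → Pre_packets_to_expected_sram packets → Spec_packets_to_expected_sram packets (packets_to_expected_sram packets)

-- ===== LEMMAS AND PROOFS =====

-- A's loop over ys ++ [p] is the loop over ys followed by one step at index i + ys.length
lemma pvGoA_append (ys : List Int) (p : Int) (i : Nat) (s : List Int) :
    pvGoA (ys ++ [p]) i s = pvStepA (pvGoA ys i s) (i + ys.length) p := by
  induction ys generalizing i s with
  | nil => simp [pvGoA]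
  | cons y ys ih => simp [pvGoA, ih]; ring_nf

-- B's inner loop over chunk ++ [p]
lemma pvByteGo_append (chunk : List Int) (p : Int) (j : Nat) (b : Int) :
    pvByteGo (chunk ++ [p]) j b =
      pvByteGo chunk j b
        + (if PySem.Int.band p 0x0F ≠ 0 then (1 : Int) else 0) * ((1 : Int) <<< (7 - 2 * (j + chunk.length)))
        + (if PySem.Int.band p 0xF0 ≠ 0 then (1 : Int) else 0) * ((1 : Int) <<< (6 - 2 * (j + chunk.length))) := by
  induction chunk generalizing j b with
  | nil => simp [pvByteGo]
  | cons c cs ih => simp [pvByteGo, ih]; ring_nf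

-- the byte accumulated from a chunk of length j (j ≤ 4) is a multiple of 2^(8-2j) below 256
lemma pvByteGo_shape (chunk : List Int) (j : Nat) (b : Int)
    (hj : j + chunk.length ≤ 4)
    (hb : b % (2 ^ (8 - 2 * j) : Nat) = 0) (hb0 : 0 ≤ b) (hb1 : b < 256) :
    pvByteGo chunk j b % (2 ^ (8 - 2 * (j + chunk.length)) : Nat) = 0 ∧
      0 ≤ pvByteGo chunk j b ∧ pvByteGo chunk j b < 256 := by
  induction chunk generalizing j b with
  | nil =>
    simp only [pvByteGo, List.length_nil, Nat.add_zero]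
    exact ⟨hb, hb0, hb1⟩
  | cons c cs ih =>
    simp only [pvByteGo, List.length_cons]
    have h4 : (j + 1) + cs.length ≤ 4 := by simp only [List.length_cons] at hj; omega
    have hj3 : j ≤ 3 := by simp only [List.length_cons] at hj; omega
    have harr : j + (cs.length + 1) = (j + 1) + cs.length := by omega
    rw [harr]
    refine ih _ _ h4 ?_ ?_ ?_ <;>
    · interval_cases j <;>
      · simp only [Int.shiftLeft_eq] at *
        try norm_num at hb ⊢
        try split_ifs
        all_goals omega

-- the bit-level crux: A's masked read-modify-write equals B's additive field update,
-- for every byte value reachable after j packets (a multiple of 2^(8-2j) below 256)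
lemma pvCrux : ∀ j < 4, ∀ k < 2 ^ (2 * j), ∀ e1 < 2, ∀ e2 < 2,
    PySem.Int.bor
        (PySem.Int.band ((2 ^ (8 - 2 * j) * k : Nat) : Int)
          (PySem.Int.band (Int.not (PySem.Int.band ((192 : Int) >>> (2 * j)) 255)) 255))
        (PySem.Int.band
          (PySem.Int.band ((PySem.Int.bor (((e1 : Nat) : Int) <<< (7 : Nat)) (((e2 : Nat) : Int) <<< (6 : Nat))) >>> (2 * j)) 255)
          (PySem.Int.band ((192 : Int) >>> (2 * j)) 255))
      = ((2 ^ (8 - 2 * j) * k : Nat) : Int)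
        + ((e1 : Nat) : Int) * ((1 : Int) <<< (7 - 2 * j))
        + ((e2 : Nat) : Int) * ((1 : Int) <<< (6 - 2 * j)) := by
  decide

-- main invariant: after processing ys (length ≤ 1024), A's sram is B's per-address byte table
-- instantiation of pvCrux at a byte value known to be reachable after j packets
lemma pvCrux' (j : Nat) (hj : j < 4) (old : Int)
    (hmod : old % (2 ^ (8 - 2 * j) : Nat) = 0) (h0 : 0 ≤ old) (h1 : old < 256)
    (e1 e2 : Nat) (he1 : e1 < 2) (he2 : e2 < 2) :
    PySem.Int.bor
        (PySem.Int.band old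
          (PySem.Int.band (Int.not (PySem.Int.band ((192 : Int) >>> (2 * j)) 255)) 255))
        (PySem.Int.band
          (PySem.Int.band ((PySem.Int.bor (((e1 : Nat) : Int) <<< (7 : Nat)) (((e2 : Nat) : Int) <<< (6 : Nat))) >>> (2 * j)) 255)
          (PySem.Int.band ((192 : Int) >>> (2 * j)) 255))
      = old + ((e1 : Nat) : Int) * ((1 : Int) <<< (7 - 2 * j))
            + ((e2 : Nat) : Int) * ((1 : Int) <<< (6 - 2 * j)) := by
  have hmpos : 0 < 2 ^ (8 - 2 * j) := by positivity
  have hdvdI : ((2 ^ (8 - 2 * j) : Nat) : Int) ∣ old := Int.dvd_of_emod_eq_zero hmod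
  obtain ⟨c, hc⟩ := hdvdI
  have hmposI : (0 : Int) < ((2 ^ (8 - 2 * j) : Nat) : Int) := by exact_mod_cast hmpos
  have hc0 : 0 ≤ c := by nlinarith [h0, hc, hmposI]
  have hofk : old = ((2 ^ (8 - 2 * j) * c.toNat : Nat) : Int) := by
    push_cast
    rw [Int.toNat_of_nonneg hc0]
    exact hc
  have hpow : 2 ^ (8 - 2 * j) * 2 ^ (2 * j) = 256 := by
    rw [← pow_add]; interval_cases j <;> norm_num
  have hklt : c.toNat < 2 ^ (2 * j) := by
    have h256 : 2 ^ (8 - 2 * j) * c.toNat < 2 ^ (8 - 2 * j) * 2 ^ (2 * j) := by omega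
    exact Nat.lt_of_mul_lt_mul_left h256
  rw [hofk]
  exact pvCrux j hj c.toNat hklt e1 he1 e2 he2

-- reading back an entry of the mapped address table
lemma pvGetDmap (g : Nat → Int) (i : Nat) (h : i < 256) :
    (List.map g (List.range 256)).getD i 0 = g i := by
  rw [List.getD_eq_getElem _ _ (by simpa using h)]
  simp

lemma pvMain (ys : List Int) (h : ys.length ≤ 1024) :
    pvGoA ys 0 (List.replicate 256 0) =
      (List.range 256).map (fun a => pvByteGo ((ys.drop (4 * a)).take 4) 0 0) := by
  induction ys using List.reverseRecOn with
  | nil =>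
    simp only [List.drop_nil, List.take_nil, pvGoA]
    rw [show (fun (a : Nat) => pvByteGo [] 0 0) = (fun (_ : Nat) => (0 : Int)) from rfl,
      List.map_const', List.length_range]
  | append_singleton ys p ih =>
    have hn : ys.length ≤ 1023 := by
      simp only [List.length_append, List.length_singleton] at h; omega
    rw [pvGoA_append, ih (by omega), Nat.zero_add]
    set n := ys.length with hnn
    have haddr : n >>> 2 = n / 4 := by simp [Nat.shiftRight_eq_div_pow]
    have haddrlt : n / 4 < 256 := by omega
    -- evaluate A's step on the mapped table
    unfold pvStepA
    simp only [haddr, PySem.List.pyGetD_natCast, PySem.List.pySetD_natCast,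
      pvGetDmap _ _ haddrlt]
    -- both sides are lists of length 256: compare pointwise
    apply List.ext_getElem (by simp)
    intro a ha _
    simp only [List.length_set, List.length_map, List.length_range] at ha
    simp only [List.getElem_set, List.getElem_map, List.getElem_range]
    by_cases hcase : n / 4 = a
    · -- the address written this step: chunk gains packet p at position n % 4
      subst hcase
      have hchunklen : ((ys.drop (4 * (n / 4))).take 4).length = n % 4 := by
        simp only [List.length_take, List.length_drop]; omega
      have hdroplen : (ys.drop (4 * (n / 4))).length = n % 4 := by
        simp only [List.length_drop]; omega
      have hchunk : (((ys ++ [p]).drop (4 * (n / 4))).take 4)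
          = (ys.drop (4 * (n / 4))).take 4 ++ [p] := by
        rw [List.drop_append_of_le_length (by omega),
          List.take_of_length_le (l := ys.drop (4 * (n / 4)) ++ [p])
            (by simp only [List.length_append, List.length_singleton, hdroplen]; omega),
          List.take_of_length_le (by omega)]
      have hchunklen4 : ((ys.drop (4 * (n / 4))).take 4).length ≤ 4 := by omega
      rw [if_pos rfl, hchunk, pvByteGo_append, Nat.zero_add, hchunklen]
      obtain ⟨hmod, h0, h1⟩ :=
        pvByteGo_shape ((ys.drop (4 * (n / 4))).take 4) 0 0 (by omega) (by simp) le_rfl (by norm_num)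
      rw [Nat.zero_add, hchunklen] at hmod
      rw [show n % 4 * 2 = 2 * (n % 4) from Nat.mul_comm _ _]
      by_cases hp1 : PySem.Int.band p 0x0F ≠ 0 <;> by_cases hp2 : PySem.Int.band p 0xF0 ≠ 0
      · rw [if_pos hp1, if_pos hp2]
        exact_mod_cast pvCrux' (n % 4) (by omega) _ hmod h0 h1 1 1 (by omega) (by omega)
      · rw [if_pos hp1, if_neg hp2]
        exact_mod_cast pvCrux' (n % 4) (by omega) _ hmod h0 h1 1 0 (by omega) (by omega)
      · rw [if_neg hp1, if_pos hp2]
        exact_mod_cast pvCrux' (n % 4) (by omega) _ hmod h0 h1 0 1 (by omega) (by omega)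
      · rw [if_neg hp1, if_neg hp2]
        exact_mod_cast pvCrux' (n % 4) (by omega) _ hmod h0 h1 0 0 (by omega) (by omega)
    · -- untouched address: the chunk is unchanged by appending p
      rw [if_neg hcase]
      congr 1
      rcases Nat.lt_or_ge a (n / 4) with hlt | hge
      · -- a < n/4 : the chunk lies entirely inside ys
        rw [List.drop_append_of_le_length (by omega),
          List.take_append_of_le_length (by simp only [List.length_drop]; omega)]
      · -- a > n/4 : the chunk is empty in both lists
        have hgt : n / 4 < a := by omega
        have h1 : (ys ++ [p]).drop (4 * a) = [] := by
          rw [List.drop_eq_nil_iff]; simp only [List.length_append, List.length_singleton]; omega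
        have h2 : ys.drop (4 * a) = [] := by rw [List.drop_eq_nil_iff]; omega
        rw [h1, h2]

theorem packets_to_expected_sram_spec_aux (packets : List Int)
    (h : packets.length ≤ 1024) :
    packets_to_expected_sram packets = packets_to_expected_sram_alt packets := by
  unfold packets_to_expected_sram packets_to_expected_sram_alt
  rw [pvMain packets h]
  refine List.map_congr_left ?_
  intro a ha
  have : PySem.List.slice packets (some ((4 * a : Nat) : Int)) (some (((4 * a : Nat) : Int) + 4))
      = (packets.drop (4 * a)).take 4 := by
    have := PySem.List.slice_natCast_add packets (4 * a) 4
    simpa using this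
  rw [this]

-- ===== VERDICT (by name: the statement is the Claim_ definition above) =====
theorem packets_to_expected_sram_spec : Claim_equal_packets_to_expected_sram := by
  intro packets _ hpre
  exact packets_to_expected_sram_spec_aux packets hpre
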